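-- pv_equiv track=rewrite | github.com/paulchan890130/hanwoory | backend/scripts/build_llm_chunks.py | cluster_pages
-- ===== SOURCE A (Python) =====
-- def cluster_pages(pages: list[int], gap: int = 5) -> list[tuple[int, int]]:
--     """연속 페이지 그룹화."""
--     if not pages: return []
--     pages = sorted(pages)
--     clusters = []; cur = [pages[0]]
--     for p in pages[1:]:
--         if p - cur[-1] > gap:
--             clusters.append((cur[0], cur[-1])); cur = [p]
--         else:
--             cur.append(p)
--     clusters.append((cur[0], cur[-1]))
--     return clusters
-- ===== SOURCE B (Python) =====
-- def cluster_pages(pages: list[int], gap: int = 5) -> list[tuple[int, int]]: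
--     """Two-phase: find gap cuts between adjacent sorted pages, then zip starts with ends."""
--     if not pages:
--         return []
--     ps = sorted(pages)
--     cuts = [(a, b) for a, b in zip(ps, ps[1:]) if b - a > gap]
--     starts = [ps[0]] + [b for a, b in cuts]
--     ends = [a for a, b in cuts] + [ps[-1]]
--     return list(zip(starts, ends))
-- ===== Notes on version B (the rewrite author's own statement) =====
-- stated objective: alternative
-- what changed: A's single stateful greedy loop carrying a growing current-cluster list is replaced by a two-phase pipeline: first compute the cut pairs (adjacent sorted pages whose difference exceeds gap), then zip the start list (first page plus each post-cut page) with the end list (each pre-cut page plus the last page).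
import Mathlib
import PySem

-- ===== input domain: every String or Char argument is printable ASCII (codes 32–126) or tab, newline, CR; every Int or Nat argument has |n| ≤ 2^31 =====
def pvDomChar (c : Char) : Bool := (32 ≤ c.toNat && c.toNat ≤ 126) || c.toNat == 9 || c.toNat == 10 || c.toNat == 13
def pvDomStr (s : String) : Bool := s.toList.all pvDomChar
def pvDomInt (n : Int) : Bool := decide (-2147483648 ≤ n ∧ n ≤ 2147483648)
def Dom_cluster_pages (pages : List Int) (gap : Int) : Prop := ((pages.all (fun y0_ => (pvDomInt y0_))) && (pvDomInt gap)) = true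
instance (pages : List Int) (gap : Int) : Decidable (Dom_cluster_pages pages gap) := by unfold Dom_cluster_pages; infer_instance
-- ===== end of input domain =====

-- B rewrites A's stateful greedy loop as a two-phase computation (find gap cuts, then zip starts with ends); objective: alternative decomposition, same cost.

-- ===== PORT A =====
-- one loop step of A: p against cur[-1]; cur is always nonempty
def pvStepA (gap : Int) (st : List (Int × Int) × List Int) (p : Int) : List (Int × Int) × List Int :=
  if p - st.2.getLast! > gap then (st.1 ++ [(st.2.head!, st.2.getLast!)], [p])
  else (st.1, st.2 ++ [p])

def cluster_pages (pages : List Int) (gap : Int) : List (Int × Int) :=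
  if pages = [] then []
  else
    match PySem.List.sorted pages (fun x => x) false with
    | [] => []  -- unreachable: pages ≠ []
    | p0 :: rest =>
      let st := rest.foldl (pvStepA gap) ([], [p0])
      st.1 ++ [(st.2.head!, st.2.getLast!)]

-- ===== PORT B =====
-- adjacent pairs of (prev :: l) whose difference exceeds gap (Python: the `cuts` list comprehension)
def pvCuts (gap prev : Int) (l : List Int) : List (Int × Int) :=
  ((prev :: l).zip l).filter (fun ab => ab.2 - ab.1 > gap)

def cluster_pages_alt (pages : List Int) (gap : Int) : List (Int × Int) :=
  if pages = [] then []
  else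
    match PySem.List.sorted pages (fun x => x) false with
    | [] => []  -- unreachable: pages ≠ []
    | p0 :: rest =>
      let cuts := pvCuts gap p0 rest
      let starts := p0 :: cuts.map (fun ab => ab.2)
      let ends := cuts.map (fun ab => ab.1) ++ [(p0 :: rest).getLast!]
      starts.zip ends

-- ===== PRECONDITION & SPEC =====
def Spec_cluster_pages (pages : List Int) (gap : Int) (out : List (Int × Int)) : Prop := out = cluster_pages_alt pages gap
instance (pages : List Int) (gap : Int) (out : List (Int × Int)) : Decidable (Spec_cluster_pages pages gap out) := by unfold Spec_cluster_pages; infer_instance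

-- ===== CLAIM (what is proved, stated in full; the proofs are below) =====
def Claim_equal_cluster_pages : Prop := ∀ (pages : List Int) (gap : Int), Dom_cluster_pages pages gap → Spec_cluster_pages pages gap (cluster_pages pages gap)

-- ===== LEMMAS AND PROOFS =====

lemma pvGetLast_cons_cons (a b : Int) (l : List Int) :
    (a :: b :: l).getLast! = (b :: l).getLast! := by
  simp [List.getLast?_cons_cons]

lemma pvGetLast_append (h p : Int) (cs : List Int) :
    (h :: (cs ++ [p])).getLast! = p := by
  induction cs generalizing h with
  | nil => rfl
  | cons c cs' ih => rw [List.cons_append, pvGetLast_cons_cons]; exact ih c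

-- the key invariant: finishing A's fold from state (acc, h :: cs) with last element t
-- yields acc followed by B's zip of starts and ends computed from the cuts of t's chain
lemma pvMain (gap : Int) : ∀ (l : List Int) (acc : List (Int × Int)) (h t : Int) (cs : List Int),
    (h :: cs).getLast! = t →
    (let st := l.foldl (pvStepA gap) (acc, h :: cs)
     st.1 ++ [(st.2.head!, st.2.getLast!)])
    = acc ++ ((h :: (pvCuts gap t l).map (fun ab => ab.2)).zip
              ((pvCuts gap t l).map (fun ab => ab.1) ++ [(t :: l).getLast!])) := by
  intro l
  induction l with
  | nil =>
    intro acc h t cs hlast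
    simp only [List.foldl_nil]
    rw [hlast]
    simp [pvCuts, List.head!, List.getLast!]
  | cons p l' ih =>
    intro acc h t cs hlast
    have hlast' : (h :: cs).getLast?.getD 0 = t := by simpa using hlast
    simp only [List.foldl_cons]
    by_cases hc : p - t > gap
    · have hstep : pvStepA gap (acc, h :: cs) p = (acc ++ [(h, t)], [p]) := by
        simp [pvStepA, hlast', hc, List.head!]
      rw [hstep]
      have := ih (acc ++ [(h, t)]) p p [] rfl
      simp only at this
      rw [this]
      have hcuts : pvCuts gap t (p :: l') = (t, p) :: pvCuts gap p l' := by
        simp [pvCuts, hc]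
      rw [hcuts, pvGetLast_cons_cons]
      simp
    · have hstep : pvStepA gap (acc, h :: cs) p = (acc, h :: (cs ++ [p])) := by
        simp [pvStepA, hlast', hc]
      rw [hstep]
      have := ih acc h p (cs ++ [p]) (pvGetLast_append h p cs)
      simp only at this
      rw [this]
      have hcuts : pvCuts gap t (p :: l') = pvCuts gap p l' := by
        simp [pvCuts, hc]
      rw [hcuts, pvGetLast_cons_cons]

-- ===== VERDICT (by name: the statement is the Claim_ definition above) =====
theorem cluster_pages_spec : Claim_equal_cluster_pages := by
  intro pages gap _
  unfold Spec_cluster_pages cluster_pages cluster_pages_alt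
  by_cases hp : pages = []
  · simp [hp]
  · simp only [hp, ite_false]
    have hlen : (PySem.List.sorted pages (fun x => x) false).length = pages.length :=
      (PySem.List.sorted_perm pages (fun x => x) false).length_eq
    cases hs : PySem.List.sorted pages (fun x => x) false with
    | nil =>
      exfalso
      have := hlen
      rw [hs] at this
      exact hp (List.eq_nil_of_length_eq_zero this.symm)
    | cons p0 rest =>
      exact pvMain gap rest [] p0 p0 [] rfl
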